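-- pv_equiv track=rewrite | github.com/scikit-hep/awkward | src/awkward/_v2/forms/form.py | _parameters_equal
-- ===== SOURCE A (Python) =====
-- def _parameters_equal(one, two, only_array_record=False):
--     if one is None and two is None:
--         return True
--     elif one is None:
--         if only_array_record:
--             # NB: __categorical__ is currently a type-only parameter, but
--             # we check it here as types check this too.
--             for key in ("__array__", "__record__", "__categorical__"):
--                 if two.get(key) is not None:
--                     return False
--             return True
--         else:
--             for value in two.values():
--                 if value is not None:
--                     return False
--             return True
--
--     elif two is None:
--         if only_array_record:
--             for key in ("__array__", "__record__", "__categorical__"):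
--                 if one.get(key) is not None:
--                     return False
--             return True
--         else:
--             for value in one.values():
--                 if value is not None:
--                     return False
--             return True
--
--     else:
--         if only_array_record:
--             keys = ("__array__", "__record__", "__categorical__")
--         else:
--             keys = set(one.keys()).union(two.keys())
--         for key in keys:
--             if one.get(key) != two.get(key):
--                 return False
--         return True
-- ===== SOURCE B (Python) =====
-- def _parameters_equal(one, two, only_array_record=False):
--     special = ("__array__", "__record__", "__categorical__")
--     def effective(d):
--         if d is None:
--             return set()
--         return {(k, v) for k, v in d.items()
--                 if v is not None and (not only_array_record or k in special)}
--     return effective(one) == effective(two)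
-- ===== Notes on version B (the rewrite author's own statement) =====
-- stated objective: alternative
-- what changed: Instead of A's five-way branch that loops over a chosen key set comparing one.get(k) to two.get(k), B canonicalizes each argument into the set of its non-None (key, value) items (restricted to the three special keys when only_array_record) and compares the two sets for equality.
import Mathlib
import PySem

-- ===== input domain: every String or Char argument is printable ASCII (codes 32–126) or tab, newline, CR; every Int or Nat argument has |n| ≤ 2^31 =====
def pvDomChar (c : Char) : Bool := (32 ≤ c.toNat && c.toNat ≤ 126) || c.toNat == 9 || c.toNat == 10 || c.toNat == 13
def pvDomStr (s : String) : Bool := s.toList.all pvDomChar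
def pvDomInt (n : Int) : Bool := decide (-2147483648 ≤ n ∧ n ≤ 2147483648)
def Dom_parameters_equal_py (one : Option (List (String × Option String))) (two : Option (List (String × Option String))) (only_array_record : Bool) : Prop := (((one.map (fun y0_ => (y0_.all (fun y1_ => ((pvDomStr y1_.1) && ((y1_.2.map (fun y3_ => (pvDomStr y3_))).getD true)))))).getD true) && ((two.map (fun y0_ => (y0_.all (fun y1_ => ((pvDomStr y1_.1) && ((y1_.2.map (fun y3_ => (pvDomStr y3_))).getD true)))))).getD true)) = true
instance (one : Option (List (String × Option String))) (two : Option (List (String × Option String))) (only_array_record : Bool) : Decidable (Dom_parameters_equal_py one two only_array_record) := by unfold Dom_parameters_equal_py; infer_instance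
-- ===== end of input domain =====

-- B replaces A's five-way branch of get-comparison loops by a different algorithm: canonicalize
-- each dict into the SET of its non-None items and compare the two sets; return value only.

-- ===== PORT A =====
-- d.get(k): first-match association-list lookup, absent key ↦ None (values are Optional[str])
def pvDictGet (d : List (String × Option String)) (k : String) : Option String :=
  ((PySem.Dict.mk d).get? k).getD none

def parameters_equal_py (one : Option (List (String × Option String))) (two : Option (List (String × Option String))) (only_array_record : Bool) : Bool :=
  match one, two with
  | none, none => true
  | none, some t =>
      if only_array_record then
        (["__array__", "__record__", "__categorical__"] : List String).all
          (fun key => (pvDictGet t key).isNone)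
      else
        (t.map (·.2)).all (fun v => v.isNone)
  | some o, none =>
      if only_array_record then
        (["__array__", "__record__", "__categorical__"] : List String).all
          (fun key => (pvDictGet o key).isNone)
      else
        (o.map (·.2)).all (fun v => v.isNone)
  | some o, some t =>
      let keys : List String :=
        if only_array_record then ["__array__", "__record__", "__categorical__"]
        else PySem.Set.union (PySem.Set.ofList (o.map (·.1))) (t.map (·.1))
      keys.all (fun key => pvDictGet o key == pvDictGet t key)

-- ===== PORT B =====
-- {(k, v) for k, v in d.items() if v is not None and (not only_array_record or k in special)}
-- (a set of (str, str) pairs in Python; the value component stays in the Option wrapper here,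
-- always `some` by the filter — the same pairs)
def pvEffective (only_array_record : Bool) (d : Option (List (String × Option String))) :
    PySem.Set (String × Option String) :=
  match d with
  | none => PySem.Set.empty
  | some l =>
      PySem.Set.ofList (l.filter (fun kv =>
        kv.2.isSome &&
          (!only_array_record ||
            (["__array__", "__record__", "__categorical__"] : List String).contains kv.1)))

def parameters_equal_py_alt (one : Option (List (String × Option String))) (two : Option (List (String × Option String))) (only_array_record : Bool) : Bool :=
  PySem.Set.equal (pvEffective only_array_record one) (pvEffective only_array_record two)

-- ===== PRECONDITION & SPEC =====
-- Pre_ requires each association list to have pairwise-distinct keys: a Python dict cannot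
-- contain a duplicate key, so duplicate-key lists represent no input the Python A ever sees.
def Pre_parameters_equal_py (one : Option (List (String × Option String))) (two : Option (List (String × Option String))) (only_array_record : Bool) : Prop :=
  ((one.getD []).map (·.1)).Nodup ∧ ((two.getD []).map (·.1)).Nodup
instance (one : Option (List (String × Option String))) (two : Option (List (String × Option String))) (only_array_record : Bool) : Decidable (Pre_parameters_equal_py one two only_array_record) := by unfold Pre_parameters_equal_py; infer_instance

def pvWitness_parameters_equal_py : (Option (List (String × Option String))) × (Option (List (String × Option String))) × Bool :=
  (some [("__array__", some "x"), ("a", none)], none, true)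

def Spec_parameters_equal_py (one : Option (List (String × Option String))) (two : Option (List (String × Option String))) (only_array_record : Bool) (out : Bool) : Prop := out = parameters_equal_py_alt one two only_array_record
instance (one : Option (List (String × Option String))) (two : Option (List (String × Option String))) (only_array_record : Bool) (out : Bool) : Decidable (Spec_parameters_equal_py one two only_array_record out) := by unfold Spec_parameters_equal_py; infer_instance

-- ===== CLAIM (what is proved, stated in full; the proofs are below) =====
def Claim_equal_parameters_equal_py : Prop := ∀ (one : Option (List (String × Option String))) (two : Option (List (String × Option String))) (only_array_record : Bool), Dom_parameters_equal_py one two only_array_record → Pre_parameters_equal_py one two only_array_record → Spec_parameters_equal_py one two only_array_record (parameters_equal_py one two only_array_record)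

-- ===== LEMMAS AND PROOFS =====

theorem pv_dictGet_eq_some_iff {l : List (String × Option String)} {k : String} {w : String}
    (hnd : (l.map (·.1)).Nodup) : pvDictGet l k = some w ↔ (k, some w) ∈ l := by
  constructor
  · intro h
    have hg : (PySem.Dict.mk l).get? k = some (some w) := by
      unfold pvDictGet at h
      cases hgk : (PySem.Dict.mk l).get? k with
      | none => simp [hgk] at h
      | some v => simp [hgk] at h; simp [h]
    exact PySem.Dict.mem_items_of_get?_eq_some _ hg
  · intro h
    have hg : (PySem.Dict.mk l).get? k = some (some w) :=
      PySem.Dict.get?_of_mem_items (d := PySem.Dict.mk l) h hnd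
    simp [pvDictGet, hg]

theorem pv_dictGet_isNone_iff {l : List (String × Option String)} {k : String}
    (hnd : (l.map (·.1)).Nodup) :
    (pvDictGet l k).isNone = true ↔ ∀ w : String, (k, some w) ∉ l := by
  constructor
  · intro h w hm
    have := (pv_dictGet_eq_some_iff hnd).mpr hm
    rw [this] at h; simp at h
  · intro h
    cases hv : pvDictGet l k with
    | none => rfl
    | some w => exact absurd ((pv_dictGet_eq_some_iff hnd).mp hv) (h w)

-- membership in B's canonical item set of `some l`
theorem pv_mem_eff {oar : Bool} {l : List (String × Option String)}
    {x : String × Option String} :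
    x ∈ pvEffective oar (some l) ↔
      x ∈ l ∧ x.2.isSome ∧ (oar = true →
        (["__array__", "__record__", "__categorical__"] : List String).contains x.1) := by
  unfold pvEffective
  rw [PySem.Set.mem_ofList, List.mem_filter]
  cases oar <;> simp

theorem pv_eff_none (oar : Bool) : pvEffective oar none = [] := rfl

theorem pv_not_mem_empty {oar : Bool} {x : String × Option String} :
    x ∉ pvEffective oar none := by
  rw [pv_eff_none]; exact List.not_mem_nil

-- ===== VERDICT (by name: the statement is the Claim_ definition above) =====
theorem parameters_equal_py_spec : Claim_equal_parameters_equal_py := by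
  intro one two oar _ hpre
  obtain ⟨h1, h2⟩ := hpre
  unfold Spec_parameters_equal_py parameters_equal_py parameters_equal_py_alt
  rw [Bool.eq_iff_iff, PySem.Set.equal_iff]
  match one, two with
  | none, none =>
      simp [pvEffective]
  | none, some t =>
      simp only [Option.getD_some] at h2
      cases oar
      · simp only [Bool.false_eq_true, if_false, List.all_eq_true, List.mem_map]
        constructor
        · intro H x
          rw [pv_eff_none, pv_mem_eff]
          simp only [List.not_mem_nil, false_iff]
          rintro ⟨hx, hs, -⟩
          have := H x.2 ⟨x, hx, rfl⟩
          simp_all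
        · intro H v hv
          obtain ⟨⟨a, b⟩, hab, rfl⟩ := hv
          by_contra hb
          obtain ⟨w, rfl⟩ := Option.ne_none_iff_exists'.mp (by simpa using hb)
          exact (pv_not_mem_empty ((H (a, some w)).mpr (pv_mem_eff.mpr ⟨hab, rfl, by simp⟩)))
      · simp only [if_pos, List.all_eq_true]
        constructor
        · intro H x
          rw [pv_eff_none, pv_mem_eff]
          simp only [List.not_mem_nil, false_iff]
          rintro ⟨hx, hs, hsp⟩
          obtain ⟨w, hw⟩ := Option.isSome_iff_exists.mp hs
          obtain ⟨a, b⟩ := x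
          subst hw
          have hk : a ∈ (["__array__", "__record__", "__categorical__"] : List String) := by
            simpa using hsp trivial
          have := (pv_dictGet_isNone_iff h2).mp (H a hk) w
          exact this hx
        · intro H k hk
          rw [pv_dictGet_isNone_iff h2]
          intro w hm
          exact pv_not_mem_empty ((H (k, some w)).mpr
            (pv_mem_eff.mpr ⟨hm, rfl, fun _ => by simpa using hk⟩))
  | some o, none =>
      simp only [Option.getD_some] at h1
      cases oar
      · simp only [Bool.false_eq_true, if_false, List.all_eq_true, List.mem_map]
        constructor
        · intro H x
          rw [pv_mem_eff, pv_eff_none]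
          simp only [List.not_mem_nil, iff_false]
          rintro ⟨hx, hs, -⟩
          have := H x.2 ⟨x, hx, rfl⟩
          simp_all
        · intro H v hv
          obtain ⟨⟨a, b⟩, hab, rfl⟩ := hv
          by_contra hb
          obtain ⟨w, rfl⟩ := Option.ne_none_iff_exists'.mp (by simpa using hb)
          exact (pv_not_mem_empty ((H (a, some w)).mp (pv_mem_eff.mpr ⟨hab, rfl, by simp⟩)))
      · simp only [if_pos, List.all_eq_true]
        constructor
        · intro H x
          rw [pv_mem_eff, pv_eff_none]
          simp only [List.not_mem_nil, iff_false]
          rintro ⟨hx, hs, hsp⟩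
          obtain ⟨w, hw⟩ := Option.isSome_iff_exists.mp hs
          obtain ⟨a, b⟩ := x
          subst hw
          have hk : a ∈ (["__array__", "__record__", "__categorical__"] : List String) := by
            simpa using hsp trivial
          have := (pv_dictGet_isNone_iff h1).mp (H a hk) w
          exact this hx
        · intro H k hk
          rw [pv_dictGet_isNone_iff h1]
          intro w hm
          exact pv_not_mem_empty ((H (k, some w)).mp
            (pv_mem_eff.mpr ⟨hm, rfl, fun _ => by simpa using hk⟩))
  | some o, some t =>
      simp only [Option.getD_some] at h1 h2
      simp only [List.all_eq_true]
      constructor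
      · -- A's pointwise get-equality over the key set ⇒ the canonical item sets coincide
        intro H x
        rw [pv_mem_eff, pv_mem_eff]
        constructor
        · rintro ⟨hx, hs, hsp⟩
          obtain ⟨w, hw⟩ := Option.isSome_iff_exists.mp hs
          obtain ⟨a, b⟩ := x
          subst hw
          have hkey : a ∈ (if oar = true then (["__array__", "__record__", "__categorical__"] : List String)
              else PySem.Set.union (PySem.Set.ofList (o.map (·.1))) (t.map (·.1))) := by
            cases oar
            · simp only [Bool.false_eq_true, if_false]
              rw [PySem.Set.mem_union]
              exact Or.inl (by rw [PySem.Set.mem_ofList]; exact List.mem_map.mpr ⟨_, hx, rfl⟩)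
            · simpa using hsp rfl
          have hg : pvDictGet o a == pvDictGet t a := H a hkey
          have ho : pvDictGet o a = some w := (pv_dictGet_eq_some_iff h1).mpr hx
          have ht : pvDictGet t a = some w := by
            rw [ho] at hg; exact (beq_iff_eq.mp hg).symm
          exact ⟨(pv_dictGet_eq_some_iff h2).mp ht, rfl, hsp⟩
        · rintro ⟨hx, hs, hsp⟩
          obtain ⟨w, hw⟩ := Option.isSome_iff_exists.mp hs
          obtain ⟨a, b⟩ := x
          subst hw
          have hkey : a ∈ (if oar = true then (["__array__", "__record__", "__categorical__"] : List String)
              else PySem.Set.union (PySem.Set.ofList (o.map (·.1))) (t.map (·.1))) := by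
            cases oar
            · simp only [Bool.false_eq_true, if_false]
              rw [PySem.Set.mem_union]
              exact Or.inr (List.mem_map.mpr ⟨_, hx, rfl⟩)
            · simpa using hsp rfl
          have hg : pvDictGet o a == pvDictGet t a := H a hkey
          have ht : pvDictGet t a = some w := (pv_dictGet_eq_some_iff h2).mpr hx
          have ho : pvDictGet o a = some w := by
            rw [ht] at hg; exact beq_iff_eq.mp hg
          exact ⟨(pv_dictGet_eq_some_iff h1).mp ho, rfl, hsp⟩
      · -- the canonical item sets coincide ⇒ pointwise get-equality on every iterated key
        intro H k hk
        rw [beq_iff_eq]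
        have hsp : oar = true → (["__array__", "__record__", "__categorical__"] : List String).contains k := by
          intro hoar; subst hoar
          simpa using hk
        cases ho : pvDictGet o k with
        | none =>
            cases ht : pvDictGet t k with
            | none => rfl
            | some w =>
                have hmem := (pv_dictGet_eq_some_iff h2).mp ht
                have : (k, some w) ∈ pvEffective oar (some o) :=
                  (H (k, some w)).mpr (pv_mem_eff.mpr ⟨hmem, rfl, hsp⟩)
                have := (pv_mem_eff.mp this).1
                rw [(pv_dictGet_eq_some_iff h1).mpr this] at ho
                exact absurd ho (by simp)
        | some w =>
            have hmem := (pv_dictGet_eq_some_iff h1).mp ho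
            have : (k, some w) ∈ pvEffective oar (some t) :=
              (H (k, some w)).mp (pv_mem_eff.mpr ⟨hmem, rfl, hsp⟩)
            have := (pv_mem_eff.mp this).1
            rw [(pv_dictGet_eq_some_iff h2).mpr this]
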